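-- pv_equiv track=rewrite | github.com/9triver/mapsql | mapsql/text_cleaner.py | _convert_date_format
-- ===== SOURCE A (Python) =====
-- _DATE_FORMAT_MAP = {
--     'YYYY-MM-DD': '%Y-%m-%d',
--     'YYYYMMDD': '%Y%m%d',
--     'YYYY': '%Y',
--     'MM': '%m',
--     'DD': '%d',
--     'HH24:MI:SS': '%H:%i:%s',
--     'YYYY-MM-DD HH24:MI:SS': '%Y-%m-%d %H:%i:%s',
-- }
--
-- def _convert_date_format(oracle_fmt: str) -> str:
--     """Convert Oracle date format string to MySQL format string."""
--     fmt = oracle_fmt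
--     # Try exact match first
--     if fmt in _DATE_FORMAT_MAP:
--         return _DATE_FORMAT_MAP[fmt]
--     # Replace longest patterns first
--     for oracle, mysql in sorted(_DATE_FORMAT_MAP.items(),
--                                 key=lambda x: -len(x[0])):
--         fmt = fmt.replace(oracle, mysql)
--     return fmt
-- ===== SOURCE B (Python) =====
-- _DATE_FORMAT_MAP = {
--     'YYYY-MM-DD': '%Y-%m-%d',
--     'YYYYMMDD': '%Y%m%d',
--     'YYYY': '%Y',
--     'MM': '%m',
--     'DD': '%d',
--     'HH24:MI:SS': '%H:%i:%s',
--     'YYYY-MM-DD HH24:MI:SS': '%Y-%m-%d %H:%i:%s',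
-- }
--
-- _PATTERNS = sorted(_DATE_FORMAT_MAP.items(), key=lambda x: -len(x[0]))
--
--
-- def _convert_date_format(oracle_fmt: str) -> str:
--     """Convert Oracle date format string to MySQL format string."""
--     def go(s, pats):
--         if not pats:
--             return s
--         pat, rep = pats[0]
--         return rep.join(go(piece, pats[1:]) for piece in s.split(pat))
--     return go(oracle_fmt, _PATTERNS)
-- ===== Notes on version B (the rewrite author's own statement) =====
-- stated objective: alternative
-- what changed: B drops the exact-match shortcut (it is redundant) and replaces the seven sequential global str.replace passes by a recursion over the priority-ordered pattern list that splits the string on the current pattern, converts each piece independently with the remaining patterns, and joins the converted pieces with the MySQL replacement.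
import Mathlib
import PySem

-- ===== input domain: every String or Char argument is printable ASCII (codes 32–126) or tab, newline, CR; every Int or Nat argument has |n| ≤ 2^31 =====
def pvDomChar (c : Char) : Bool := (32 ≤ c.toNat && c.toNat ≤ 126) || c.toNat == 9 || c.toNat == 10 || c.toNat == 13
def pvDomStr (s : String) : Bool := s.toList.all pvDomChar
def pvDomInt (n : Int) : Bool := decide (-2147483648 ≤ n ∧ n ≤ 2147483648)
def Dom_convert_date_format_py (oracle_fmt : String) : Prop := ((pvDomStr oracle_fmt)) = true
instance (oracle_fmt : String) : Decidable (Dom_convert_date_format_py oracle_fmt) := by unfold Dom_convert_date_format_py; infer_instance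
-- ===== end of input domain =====

-- B replaces A's exact-match shortcut plus seven sequential global replace passes by a
-- recursion over the priority-ordered pattern list (split on the pattern, convert the
-- pieces with the remaining patterns, join with the replacement); same result, similar cost.


-- ===== PORT A =====
-- _DATE_FORMAT_MAP (module-level dict, insertion order)
def pvMapA : PySem.Dict String String := PySem.Dict.ofList
  [("YYYY-MM-DD", "%Y-%m-%d"), ("YYYYMMDD", "%Y%m%d"), ("YYYY", "%Y"), ("MM", "%m"),
   ("DD", "%d"), ("HH24:MI:SS", "%H:%i:%s"), ("YYYY-MM-DD HH24:MI:SS", "%Y-%m-%d %H:%i:%s")]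

def convert_date_format_py (oracle_fmt : String) : String :=
  let fmt := oracle_fmt
  -- if fmt in _DATE_FORMAT_MAP: return _DATE_FORMAT_MAP[fmt]
  if pvMapA.contains fmt then (pvMapA.get? fmt).getD "" else
  -- for oracle, mysql in sorted(_DATE_FORMAT_MAP.items(), key=lambda x: -len(x[0])): fmt = fmt.replace(oracle, mysql)
  (PySem.List.sorted pvMapA.items (fun x => -(PySem.Str.len x.1))).foldl
    (fun f p => PySem.Str.replace f p.1 p.2) fmt

-- ===== PORT B =====
-- the same module-level dict, then _PATTERNS = sorted(_DATE_FORMAT_MAP.items(), key=lambda x: -len(x[0]))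
def pvMapB : PySem.Dict String String := PySem.Dict.ofList
  [("YYYY-MM-DD", "%Y-%m-%d"), ("YYYYMMDD", "%Y%m%d"), ("YYYY", "%Y"), ("MM", "%m"),
   ("DD", "%d"), ("HH24:MI:SS", "%H:%i:%s"), ("YYYY-MM-DD HH24:MI:SS", "%Y-%m-%d %H:%i:%s")]

def pvPatternsB : List (String × String) :=
  PySem.List.sorted pvMapB.items (fun x => -(PySem.Str.len x.1))

-- go(s, pats): rep.join(go(piece, pats[1:]) for piece in s.split(pat))
-- (s.split(pat) for the nonempty literal patterns is exactly PySem.Chars.splitOn; join is exact)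
def pvGoB : List (String × String) → List Char → List Char
  | [], s => s
  | (pat, rep) :: rest, s =>
      PySem.Chars.join rep.toList ((PySem.Chars.splitOn s pat.toList).map (pvGoB rest))

def convert_date_format_py_alt (oracle_fmt : String) : String :=
  String.ofList (pvGoB pvPatternsB oracle_fmt.toList)

-- ===== PRECONDITION & SPEC =====
def Spec_convert_date_format_py (oracle_fmt : String) (out : String) : Prop := out = convert_date_format_py_alt oracle_fmt
instance (oracle_fmt : String) (out : String) : Decidable (Spec_convert_date_format_py oracle_fmt out) := by unfold Spec_convert_date_format_py; infer_instance

-- ===== CLAIM (what is proved, stated in full; the proofs are below) =====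
def Claim_equal_convert_date_format_py : Prop := ∀ (oracle_fmt : String), Dom_convert_date_format_py oracle_fmt → Spec_convert_date_format_py oracle_fmt (convert_date_format_py oracle_fmt)

-- ===== LEMMAS AND PROOFS =====
def pvRep (p r : List Char) : List Char → List Char
  | [] => []
  | c :: t => if p.isPrefixOf (c :: t) then r ++ pvRep p r (t.drop (p.length - 1)) else c :: pvRep p r t
termination_by s => s.length
decreasing_by all_goals simp

lemma pvRep_nil (p r : List Char) : pvRep p r [] = [] := by simp [pvRep]

lemma pvGo_eq_rep (p r : List Char) (hp : p ≠ []) :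
    ∀ fuel l acc, l.length ≤ fuel →
      PySem.Chars.replace.go p r fuel l acc = acc.reverse ++ pvRep p r l := by
  intro fuel
  induction fuel with
  | zero =>
    intro l acc h
    have hl : l = [] := by cases l <;> simp_all
    subst hl
    rw [PySem.Chars.replace.go]; simp [pvRep_nil]
  | succ f ih =>
    intro l acc h
    cases l with
    | nil =>
      rw [PySem.Chars.replace.go]; simp [pvRep_nil]; omega
    | cons c t =>
      obtain ⟨n, hn⟩ : ∃ n, p.length = n + 1 := ⟨p.length - 1, by
        have := List.length_pos_iff.mpr hp; omega⟩
      rw [PySem.Chars.replace.go]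
      by_cases hpre : p.isPrefixOf (c :: t)
      · simp only [hpre, if_true]
        rw [ih _ _ (by simp at h ⊢; omega)]
        rw [pvRep]
        simp [hpre, hn]
      · simp only [hpre]
        rw [if_neg (by simp [hpre]), ih _ _ (by simp at h ⊢; omega)]
        rw [pvRep]
        simp [hpre]

lemma pvReplace_eq_rep (p r s : List Char) (hp : p ≠ []) :
    PySem.Chars.replace s p r = pvRep p r s := by
  rw [PySem.Chars.replace]
  rw [if_neg (by simp [hp])]
  simpa using pvGo_eq_rep p r hp s.length s [] le_rfl

def pvConsHead (c : Char) : List (List Char) → List (List Char)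
  | [] => [[c]]
  | h :: t => (c :: h) :: t

def pvSpl (p : List Char) : List Char → List (List Char)
  | [] => [[]]
  | c :: t => if p.isPrefixOf (c :: t) then [] :: pvSpl p (t.drop (p.length - 1)) else pvConsHead c (pvSpl p t)
termination_by s => s.length
decreasing_by all_goals simp

def pvPrepHead (pre : List Char) : List (List Char) → List (List Char)
  | [] => [pre]
  | h :: t => (pre ++ h) :: t

lemma pvSpl_ne_nil (p s : List Char) : pvSpl p s ≠ [] := by
  cases s with
  | nil => simp [pvSpl]
  | cons c t =>
    rw [pvSpl]
    split
    · simp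
    · cases h : pvSpl p t <;> simp [pvConsHead]

lemma pvPrepHead_nil_of_ne (ps : List (List Char)) (h : ps ≠ []) : pvPrepHead [] ps = ps := by
  cases ps with
  | nil => simp_all
  | cons a t => simp [pvPrepHead]

lemma pvPrepHead_snoc (x : List Char) (c : Char) (ps : List (List Char)) :
    pvPrepHead (x ++ [c]) ps = pvPrepHead x (pvConsHead c ps) := by
  cases ps <;> simp [pvPrepHead, pvConsHead]

lemma pvGoSpl_eq_spl (sep : List Char) (hp : sep ≠ []) :
    ∀ fuel l cur acc, l.length ≤ fuel →
      PySem.Chars.splitOn.go sep fuel l cur acc =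
        acc.reverse ++ pvPrepHead cur.reverse (pvSpl sep l) := by
  intro fuel
  induction fuel with
  | zero =>
    intro l cur acc h
    have hl : l = [] := by cases l <;> simp_all
    subst hl
    rw [PySem.Chars.splitOn.go]; simp [pvSpl, pvPrepHead]
  | succ f ih =>
    intro l cur acc h
    cases l with
    | nil =>
      rw [PySem.Chars.splitOn.go]; simp [pvSpl, pvPrepHead]; omega
    | cons c t =>
      obtain ⟨n, hn⟩ : ∃ n, sep.length = n + 1 := ⟨sep.length - 1, by
        have := List.length_pos_iff.mpr hp; omega⟩
      rw [PySem.Chars.splitOn.go]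
      by_cases hpre : sep.isPrefixOf (c :: t)
      · simp only [hpre, if_true]
        rw [ih _ _ _ (by simp at h ⊢; omega)]
        rw [pvSpl]
        simp only [hpre, if_true]
        rw [List.reverse_nil, pvPrepHead_nil_of_ne _ (pvSpl_ne_nil _ _)]
        simp [pvPrepHead, hn]
      · rw [if_neg (by simp [hpre]), ih _ _ _ (by simp at h ⊢; omega)]
        rw [pvSpl]
        simp only [hpre]
        simp [pvPrepHead_snoc]

lemma pvSplitOn_eq_spl (sep s : List Char) (hp : sep ≠ []) :
    PySem.Chars.splitOn s sep = pvSpl sep s := by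
  rw [PySem.Chars.splitOn]
  rw [pvGoSpl_eq_spl sep hp _ s [] [] (by omega)]
  simp [pvPrepHead_nil_of_ne _ (pvSpl_ne_nil _ _)]

lemma pvIntercalate_cons_cons (sep a : List Char) (b : List Char) (l : List (List Char)) :
    List.intercalate sep (a :: b :: l) = a ++ sep ++ List.intercalate sep (b :: l) := by
  simp [List.intercalate, List.intersperse]

lemma pvIntercalate_consHead (sep : List Char) (c : Char) (ps : List (List Char)) :
    List.intercalate sep (pvConsHead c ps) = c :: List.intercalate sep ps := by
  cases ps with
  | nil => simp [pvConsHead, List.intercalate]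
  | cons h t =>
    cases t with
    | nil => simp [pvConsHead, List.intercalate]
    | cons b l => rw [pvConsHead, pvIntercalate_cons_cons, pvIntercalate_cons_cons]; simp

lemma pvRep_eq_intercalate (p r s : List Char) :
    pvRep p r s = List.intercalate r (pvSpl p s) := by
  fun_induction pvSpl p s with
  | case1 => simp [pvRep_nil, List.intercalate]
  | case2 c t hpre ih =>
    rw [pvRep, if_pos hpre]
    have hne := pvSpl_ne_nil p (t.drop (p.length - 1))
    cases hs : pvSpl p (t.drop (p.length - 1)) with
    | nil => exact absurd hs hne
    | cons a l =>
      rw [pvIntercalate_cons_cons]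
      rw [ih, hs]
      simp
  | case3 c t hpre ih =>
    rw [pvRep, if_neg hpre, pvIntercalate_consHead, ih]

def pvBar (p sep : List Char) : Prop :=
  p ≠ [] ∧ sep ≠ [] ∧
  (∀ k, k < p.length → 0 < k → ¬ (p.drop k <+: sep) ∧ ¬ (sep <+: p.drop k)) ∧
  (∀ j, j < sep.length → ¬ (p <+: sep.drop j) ∧ ¬ (sep.drop j <+: p))

lemma pvRep_sep_suffix (p r sep : List Char) (hb : pvBar p sep) :
    ∀ d y, d <:+ sep → pvRep p r (d ++ y) = d ++ pvRep p r y := by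
  intro d
  induction d with
  | nil => intro y _; simp
  | cons c t ih =>
    intro y hd
    obtain ⟨u, hu⟩ := hd
    have hdrop : sep.drop u.length = c :: t := by rw [← hu, List.drop_left]
    have hj : u.length < sep.length := by
      have := congrArg List.length hu; simp at this; omega
    have hnp : ¬ p <+: (c :: t) ++ y := by
      intro hpre
      by_cases hle : p.length ≤ (c :: t).length
      · have hps : p <+: c :: t :=
          List.prefix_of_prefix_length_le hpre (List.prefix_append _ _) hle
        rw [← hdrop] at hps
        exact (hb.2.2.2 u.length hj).1 hps
      · have hsp : (c :: t) <+: p :=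
          List.prefix_of_prefix_length_le (List.prefix_append _ _) hpre (by omega)
        rw [← hdrop] at hsp
        exact (hb.2.2.2 u.length hj).2 hsp
    rw [List.cons_append, pvRep,
      if_neg (by rw [List.isPrefixOf_iff_prefix]; rw [List.cons_append] at hnp; exact hnp)]
    rw [ih y (((List.suffix_cons c t).trans ⟨u, hu⟩))]; simp

lemma pvRep_barrier (p r sep : List Char) (hb : pvBar p sep) :
    ∀ x y, pvRep p r (x ++ sep ++ y) = pvRep p r x ++ sep ++ pvRep p r y := by
  have main : ∀ n x y, x.length ≤ n →
      pvRep p r (x ++ sep ++ y) = pvRep p r x ++ sep ++ pvRep p r y := by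
    intro n
    induction n with
    | zero =>
      intro x y h
      have hx : x = [] := by cases x <;> simp_all
      subst hx
      simpa [pvRep_nil] using pvRep_sep_suffix p r sep hb sep y List.suffix_rfl
    | succ f ih =>
      intro x y h
      cases x with
      | nil =>
        simpa [pvRep_nil] using pvRep_sep_suffix p r sep hb sep y List.suffix_rfl
      | cons c t =>
        simp only [List.cons_append, List.append_assoc]
        by_cases hpre : p <+: c :: (t ++ (sep ++ y))
        · by_cases hle : p.length ≤ t.length + 1
          · have hpx : p <+: c :: t := by
              refine List.prefix_of_prefix_length_le hpre ?_ (by simpa using hle)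
              exact (List.prefix_append (c :: t) (sep ++ y)).trans (by simp)
            rw [pvRep, if_pos (by rw [List.isPrefixOf_iff_prefix]; exact hpre)]
            rw [pvRep, if_pos (by rw [List.isPrefixOf_iff_prefix]; exact hpx)]
            rw [List.drop_append_of_le_length (by omega)]
            rw [← List.append_assoc, ih _ y (by simp at h ⊢; omega)]
            simp
          · exfalso
            have hxp : (c :: t) <+: p := by
              refine List.prefix_of_prefix_length_le ?_ hpre (by simp; omega)
              exact (List.prefix_append (c :: t) (sep ++ y)).trans (by simp)
            obtain ⟨q, hq⟩ := hxp
            have hqpre : q <+: sep ++ y := by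
              have := hpre
              rw [← hq] at this
              simpa using (List.prefix_append_right_inj (c :: t)).mp (by simpa using this)
            have hdq : p.drop (t.length + 1) = q := by
              rw [← hq]
              simpa using List.drop_left (c :: t) q
            have hklt : t.length + 1 < p.length := by omega
            have hbar := hb.2.2.1 (t.length + 1) hklt (by omega)
            rw [hdq] at hbar
            by_cases hql : q.length ≤ sep.length
            · exact hbar.1 (List.prefix_of_prefix_length_le hqpre (List.prefix_append _ _) hql)
            · exact hbar.2 (List.prefix_of_prefix_length_le (List.prefix_append _ _) hqpre (by omega))
        · have hnx : ¬ p <+: c :: t := by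
            intro hx
            exact hpre (hx.trans (by exact (List.prefix_append (c :: t) (sep ++ y)).trans (by simp)))
          rw [pvRep, if_neg (by rw [List.isPrefixOf_iff_prefix]; exact hpre)]
          rw [pvRep, if_neg (by rw [List.isPrefixOf_iff_prefix]; exact hnx)]
          rw [← List.append_assoc, ih t y (by simp at h ⊢; omega)]
          simp
  exact fun x y => main x.length x y le_rfl

def pvFold (ps : List (List Char × List Char)) (s : List Char) : List Char :=
  ps.foldl (fun s q => pvRep q.1 q.2 s) s

lemma pvFold_nil (ps : List (List Char × List Char)) : pvFold ps [] = [] := by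
  induction ps with
  | nil => rfl
  | cons q rest ih => simp [pvFold, pvRep_nil] at ih ⊢; exact ih

lemma pvFold_cons (q : List Char × List Char) (rest : List (List Char × List Char)) (s : List Char) :
    pvFold (q :: rest) s = pvFold rest (pvRep q.1 q.2 s) := rfl

lemma pvFold_barrier (ps : List (List Char × List Char)) (sep : List Char)
    (hb : ∀ q ∈ ps, pvBar q.1 sep) :
    ∀ x y, pvFold ps (x ++ sep ++ y) = pvFold ps x ++ sep ++ pvFold ps y := by
  induction ps with
  | nil => intro x y; simp [pvFold]
  | cons q rest ih =>
    intro x y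
    rw [pvFold_cons, pvRep_barrier q.1 q.2 sep (hb q (by simp)) x y]
    rw [ih (fun q hq => hb q (by simp [hq])) _ _, pvFold_cons, pvFold_cons]

lemma pvFold_intercalate (ps : List (List Char × List Char)) (sep : List Char)
    (hb : ∀ q ∈ ps, pvBar q.1 sep) :
    ∀ parts, pvFold ps (List.intercalate sep parts) =
      List.intercalate sep (parts.map (pvFold ps)) := by
  intro parts
  induction parts with
  | nil => simp [List.intercalate, pvFold_nil]
  | cons a l ih =>
    cases l with
    | nil => simp [List.intercalate]
    | cons b l2 =>
      rw [pvIntercalate_cons_cons, pvFold_barrier ps sep hb, ih]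
      simp [pvIntercalate_cons_cons]

def pvCharPairs (ps : List (String × String)) : List (List Char × List Char) :=
  ps.map (fun q => (q.1.toList, q.2.toList))

def pvGood : List (List Char × List Char) → Prop
  | [] => True
  | (p, r) :: rest => p ≠ [] ∧ (∀ q ∈ rest, pvBar q.1 r) ∧ pvGood rest

lemma pvGoB_eq_fold (ps : List (String × String)) (hg : pvGood (pvCharPairs ps)) :
    ∀ s, pvGoB ps s = pvFold (pvCharPairs ps) s := by
  induction ps with
  | nil => intro s; rfl
  | cons q rest ih =>
    obtain ⟨pat, rep⟩ := q
    simp only [pvCharPairs, List.map_cons, pvGood] at hg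
    obtain ⟨hp1, hbar, hgood⟩ := hg
    intro s
    have hfun : pvGoB rest = pvFold (pvCharPairs rest) := funext (ih hgood)
    rw [pvGoB, PySem.Chars.join, pvSplitOn_eq_spl _ _ hp1, hfun]
    have hbar' : ∀ q ∈ pvCharPairs rest, pvBar q.1 rep.toList := by
      intro q hq
      exact hbar q (by simpa [pvCharPairs] using hq)
    rw [← pvFold_intercalate (pvCharPairs rest) rep.toList hbar']
    rw [← pvRep_eq_intercalate]
    simp only [pvCharPairs, List.map_cons, pvFold_cons]

lemma pvStrFold_eq (ps : List (String × String)) (hne : ∀ q ∈ ps, q.1.toList ≠ []) :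
    ∀ fmt : String,
      (ps.foldl (fun f p => PySem.Str.replace f p.1 p.2) fmt).toList =
        pvFold (pvCharPairs ps) fmt.toList := by
  induction ps with
  | nil => intro fmt; rfl
  | cons q rest ih =>
    intro fmt
    rw [List.foldl_cons, ih (fun a ha => hne a (by simp [ha]))]
    simp only [pvCharPairs, List.map_cons, pvFold_cons]
    congr 1
    rw [PySem.Str.toList_replace]
    exact pvReplace_eq_rep _ _ _ (hne q (by simp))

def pvL7 : List (String × String) :=
  [("YYYY-MM-DD HH24:MI:SS", "%Y-%m-%d %H:%i:%s"), ("YYYY-MM-DD", "%Y-%m-%d"),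
   ("HH24:MI:SS", "%H:%i:%s"), ("YYYYMMDD", "%Y%m%d"), ("YYYY", "%Y"), ("MM", "%m"), ("DD", "%d")]

lemma pvGood_L7 : pvGood (pvCharPairs pvL7) := by
  simp only [pvL7, pvCharPairs, List.map_cons, List.map_nil, pvGood,
    List.forall_mem_cons]
  repeat' apply And.intro
  all_goals first | trivial | (simp only [pvBar]; decide)

-- ===== VERDICT (by name: the statement is the Claim_ definition above) =====
theorem convert_date_format_py_spec : Claim_equal_convert_date_format_py := by
  intro fmt _
  unfold Spec_convert_date_format_py
  have hsorted : PySem.List.sorted pvMapA.items (fun x => -(PySem.Str.len x.1)) = pvL7 := by decide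
  have hpats : pvPatternsB = pvL7 := by decide
  by_cases hc : pvMapA.contains fmt
  · have hmem : fmt = "YYYY-MM-DD" ∨ fmt = "YYYYMMDD" ∨ fmt = "YYYY" ∨ fmt = "MM" ∨ fmt = "DD" ∨
        fmt = "HH24:MI:SS" ∨ fmt = "YYYY-MM-DD HH24:MI:SS" := by
      rw [PySem.Dict.contains_eq_decide_mem_keys] at hc
      have hk : pvMapA.keys = ["YYYY-MM-DD", "YYYYMMDD", "YYYY", "MM", "DD", "HH24:MI:SS",
        "YYYY-MM-DD HH24:MI:SS"] := by decide
      rw [hk] at hc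
      simpa using of_decide_eq_true hc
    rcases hmem with rfl | rfl | rfl | rfl | rfl | rfl | rfl <;> decide
  · rw [convert_date_format_py]
    simp only [if_neg hc, hsorted]
    rw [convert_date_format_py_alt, hpats]
    apply String.toList_inj.mp
    rw [pvStrFold_eq pvL7 (by decide) fmt]
    rw [← pvGoB_eq_fold pvL7 pvGood_L7 fmt.toList]
    simp
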